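-- pv_equiv track=rewrite | github.com/altoid/misc_puzzles | py/prime_bits/solution.py | successor_with_fewer_bits
-- ===== SOURCE A (Python) =====
-- def get_bits(n):
--     """
--     return a list of 0s and 1s corresponding to the bits in n.  the element at position 0
--     is the most significant bit.
--     """
--     binstr = bin(n)[2:]
--     binstr = list(binstr)
--     return list(map(int, binstr))
--
-- def successor_with_fewer_bits(n, k, width):
--     """
--     find the smallest number m > n such that m has k fewer 1 bits.  return None if no number meets
--     this condition.
--
--     examples.  width is 16 in all cases.
--
--     1101 1110 0101 0010 = 56914
--     1101 1110 0110 0000 = 56928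
--     1101 1110 1000 0000 = 56960
--     1111 1100 0000 0000 = 64512
--     None
--     """
--     if n == 0:
--         return None
--
--     # clear the k lowest-order 1 bits.
--     m = n
--     for x in range(k):
--         m = m & (m - 1)
--
--         # in this case, n is a power of 2 and there is no successor with fewer bits.
--         if m == 0:
--             return None
--
--     # if m is all 1s to the left of all 0s, then there is no successor with fewer bits.
--     # we've already removed one bit and we can't make m bigger by moving bits around.
--     # i.e. 111....100000...000
--     bits = get_bits(m)
--     bits = [0] * (width - len(bits)) + bits
--
--     first_zero = None
--     last_one = None
--     i = 0
--     for b in bits: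
--         if b == 1:
--             last_one = i
--         i += 1
--
--     # now find the first zero to the left of the last 1
--     i = last_one - 1
--     while i >= 0:
--         if bits[i] == 0:
--             first_zero = i
--             break
--         i -= 1
--
--     if first_zero is None:
--         return None
--
--     # now swap them
--     bits[last_one], bits[first_zero] = bits[first_zero], bits[last_one]
--
--     # change the bits into a number
--     result = 0
--     for b in bits:
--         result *= 2
--         if b:
--             result += 1
--
--     return result
-- ===== SOURCE B (Python) =====
-- def successor_with_fewer_bits(n, k, width):
--     if n == 0:
--         return None
--     # clear the k lowest-order 1 bits (same as A)
--     m = n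
--     for _ in range(k):
--         m &= m - 1
--         if m == 0:
--             return None
--     # single LSB-to-MSB scan over the effective width: find the lowest set bit j,
--     # then the lowest zero bit above it; move that set bit up.  no bit list built.
--     eff = max(width, m.bit_length())
--     j = None
--     for i in range(eff):
--         if (m >> i) & 1:
--             if j is None:
--                 j = i
--         elif j is not None:
--             return m - (1 << j) + (1 << i)
--     return None
-- ===== Notes on version B (the rewrite author's own statement) =====
-- stated objective: simpler
-- what changed: A builds an MSB-first bit list (via bin()), scans it twice for the last 1 and the first 0 to its left, swaps them and refolds the list into an int; B never builds a list: one LSB-to-MSB pass over shifted bits finds the lowest set bit j and the lowest clear bit i above it and returns m - (1<<j) + (1<<i).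
import Mathlib
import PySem

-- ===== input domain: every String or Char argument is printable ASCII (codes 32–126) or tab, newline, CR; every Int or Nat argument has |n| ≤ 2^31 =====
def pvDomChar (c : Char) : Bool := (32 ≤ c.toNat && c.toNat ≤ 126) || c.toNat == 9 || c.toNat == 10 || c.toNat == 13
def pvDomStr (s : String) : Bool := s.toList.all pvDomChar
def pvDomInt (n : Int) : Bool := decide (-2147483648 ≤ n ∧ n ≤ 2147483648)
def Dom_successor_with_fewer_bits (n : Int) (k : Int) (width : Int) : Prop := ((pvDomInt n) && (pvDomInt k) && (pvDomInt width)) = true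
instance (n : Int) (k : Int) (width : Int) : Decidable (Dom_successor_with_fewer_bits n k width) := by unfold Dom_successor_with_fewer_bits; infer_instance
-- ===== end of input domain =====

-- B replaces A's MSB-first bit-list build / index scans / swap / refold by one LSB-to-MSB
-- arithmetic scan over shifted bits (no list is built); return value only, no mutation.

-- ===== PORT A =====

-- bin(m)[2:] as a list of 0/1 ints, MSB first (bin emits digits by repeated halving; exact for the m > 0 at the call site)
def pvGetBitsNat : Nat → List Int
  | 0 => []
  | (m + 1) => pvGetBitsNat ((m + 1) / 2) ++ [(((m + 1) % 2 : Nat) : Int)]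
decreasing_by exact Nat.div_lt_self (Nat.succ_pos m) one_lt_two

def pvGetBits (n : Int) : List Int := pvGetBitsNat n.toNat

-- the 'for x in range(k): m &= m-1; if m == 0: return None' loop
def pvClearA : Nat → Int → Option Int
  | 0, m => some m
  | (f + 1), m =>
    let m2 := PySem.Int.band m (m - 1)
    if m2 = 0 then none else pvClearA f m2

-- body of the 'for b in bits' loop computing last_one (state = (last_one, i))
def pvLastStep (st : Option Int × Int) (b : Int) : Option Int × Int :=
  (if b = 1 then some st.2 else st.1, st.2 + 1)

-- the 'while i >= 0' downward scan for first_zero (bits[i] is always in range when reached)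
def pvFirstZeroDown (bits : List Int) (i : Int) : Option Int :=
  if h : 0 ≤ i then
    if PySem.List.pyGetD bits i 1 = 0 then some i else pvFirstZeroDown bits (i - 1)
  else none
termination_by (i + 1).toNat
decreasing_by omega

-- body of the final 'result *= 2; if b: result += 1' loop
def pvValStep (r b : Int) : Int := if b ≠ 0 then 2 * r + 1 else 2 * r

-- everything after the clearing loop
def pvSwapA (m width : Int) : Option Int :=
  let bits0 := pvGetBits m
  let bits := List.replicate (width - (bits0.length : Int)).toNat (0 : Int) ++ bits0
  match (bits.foldl pvLastStep (none, 0)).1 with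
  | none => none   -- unreachable under Pre_ (m > 0 has a 1 bit; Python would raise TypeError)
  | some lastOne =>
    match pvFirstZeroDown bits (lastOne - 1) with
    | none => none
    | some firstZero =>
      let b1 := PySem.List.pyGetD bits firstZero 0
      let b2 := PySem.List.pyGetD bits lastOne 0
      let bits2 := (bits.set lastOne.toNat b1).set firstZero.toNat b2
      some (bits2.foldl pvValStep 0)

def successor_with_fewer_bits (n : Int) (k : Int) (width : Int) : Option Int :=
  if n = 0 then none
  else
    match pvClearA k.toNat n with
    | none => none
    | some m => pvSwapA m width

-- ===== PORT B =====

-- 'for i in range(eff): …' with early return; state j? = lowest set-bit position found so far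
def pvBScan (m : Int) (j? : Option Int) : List Int → Option Int
  | [] => none
  | i :: rest =>
    if PySem.Int.band (m >>> i.toNat) 1 ≠ 0 then
      match j? with
      | none => pvBScan m (some i) rest
      | some _ => pvBScan m j? rest
    else
      match j? with
      | some j => some (m - (1 <<< j.toNat) + (1 <<< i.toNat))
      | none => pvBScan m none rest

def pvScanB (m width : Int) : Option Int :=
  let eff := max width ((PySem.Int.bitLength m : Nat) : Int)
  pvBScan m none (PySem.List.pyRange 0 eff 1)

def successor_with_fewer_bits_alt (n : Int) (k : Int) (width : Int) : Option Int :=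
  if n = 0 then none
  else
    -- Source B's clearing loop is the same code as A's; one shared transliteration
    match pvClearA k.toNat n with
    | none => none
    | some m => pvScanB m width

-- ===== PRECONDITION & SPEC =====

-- Pre_ excludes n < 0, where A raises (ValueError inside get_bits: bin(m) of a negative m).
def Pre_successor_with_fewer_bits (n : Int) (k : Int) (width : Int) : Prop := 0 ≤ n
instance (n : Int) (k : Int) (width : Int) : Decidable (Pre_successor_with_fewer_bits n k width) := by
  unfold Pre_successor_with_fewer_bits; infer_instance

def pvWitness_successor_with_fewer_bits : Int × Int × Int := (56914, 1, 16)

def Spec_successor_with_fewer_bits (n : Int) (k : Int) (width : Int) (out : Option Int) : Prop :=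
  out = successor_with_fewer_bits_alt n k width
instance (n : Int) (k : Int) (width : Int) (out : Option Int) : Decidable (Spec_successor_with_fewer_bits n k width out) := by
  unfold Spec_successor_with_fewer_bits; infer_instance

-- ===== CLAIM (what is proved, stated in full; the proofs are below) =====
def Claim_equal_successor_with_fewer_bits : Prop := ∀ (n : Int) (k : Int) (width : Int), Dom_successor_with_fewer_bits n k width → Pre_successor_with_fewer_bits n k width → Spec_successor_with_fewer_bits n k width (successor_with_fewer_bits n k width)


-- ===== LEMMAS AND PROOFS =====

-- the padded bit list of A, abstractly: MSB-first list of p (L-1), …, p 0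
def pvRevBits (p : Nat → Int) (L : Nat) : List Int := ((List.range L).map p).reverse

theorem pvRevBits_zero (p : Nat → Int) : pvRevBits p 0 = [] := rfl

theorem pvRevBits_succ (p : Nat → Int) (L : Nat) :
    pvRevBits p (L + 1) = pvRevBits (fun t => p (t + 1)) L ++ [p 0] := by
  simp [pvRevBits, List.range_succ_eq_map, List.map_map, Function.comp_def, Nat.succ_eq_add_one]

theorem pvRevBits_length (p : Nat → Int) (L : Nat) : (pvRevBits p L).length = L := by
  simp [pvRevBits]

theorem pvRevBits_getElem (p : Nat → Int) (L t : Nat) (h : t < L) :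
    (pvRevBits p L)[t]'(by simpa [pvRevBits_length] using h) = p (L - 1 - t) := by
  have h1 : t < ((List.range L).map p).reverse.length := by simpa using h
  have h2 : ((List.range L).map p).length - 1 - t < ((List.range L).map p).length := by
    simp; omega
  simp only [pvRevBits, List.getElem_reverse, List.getElem_map, List.getElem_range]
  simp

theorem pvRevBits_getD (p : Nat → Int) (L : Nat) (i : Int) (d : Int)
    (h0 : 0 ≤ i) (h1 : i < (L : Int)) :
    PySem.List.pyGetD (pvRevBits p L) i d = p (L - 1 - i.toNat) := by
  rw [PySem.List.pyGetD_of_nonneg _ _ h0]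
  have ht : i.toNat < L := by omega
  rw [List.getD_eq_getElem _ _ (by simpa [pvRevBits_length] using ht)]
  exact pvRevBits_getElem p L i.toNat ht

theorem pvRevBits_set (p : Nat → Int) (L q : Nat) (v : Int) (h : q < L) :
    (pvRevBits p L).set (L - 1 - q) v = pvRevBits (Function.update p q v) L := by
  apply List.ext_getElem
  · simp [pvRevBits_length]
  · intro t h1 h2
    have htL : t < L := by simpa [pvRevBits_length] using h2
    rw [List.getElem_set, pvRevBits_getElem _ _ _ htL,
      pvRevBits_getElem (Function.update p q v) _ _ htL, Function.update_apply]
    by_cases he : L - 1 - q = t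
    · have hq : L - 1 - t = q := by omega
      simp [he, hq]
    · have hq : ¬ (L - 1 - t = q) := by omega
      rw [if_neg he, if_neg hq]

-- A's get_bits produces exactly the bitLength-wide testBit list
theorem pvGetBitsNat_eq (M : Nat) :
    pvGetBitsNat M =
      pvRevBits (fun t => if M.testBit t then 1 else 0) (PySem.Int.bitLength (M : Int)) := by
  induction M using Nat.strong_induction_on with
  | _ M ih =>
    match M with
    | 0 => simp [pvGetBitsNat, PySem.Int.bitLength_zero, pvRevBits_zero]
    | (m + 1) =>
      rw [pvGetBitsNat, PySem.Int.bitLength_natCast (Nat.succ_pos m), pvRevBits_succ,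
        ih ((m + 1) / 2) (Nat.div_lt_self (Nat.succ_pos m) one_lt_two)]
      congr 1
      · congr 1
        funext t
        rw [← Nat.testBit_succ]
      · have h2 : (m + 1) % 2 = 0 ∨ (m + 1) % 2 = 1 := by omega
        rcases h2 with h2 | h2 <;> simp [Nat.testBit_zero, h2]

theorem pvPad_eq (w : Int) (p : Nat → Int) (bl : Nat) (hz : ∀ t, bl ≤ t → p t = 0) :
    List.replicate (w - (bl : Int)).toNat (0 : Int) ++ pvRevBits p bl =
      pvRevBits p ((max w (bl : Int)).toNat) := by
  set L := (max w (bl : Int)).toNat with hL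
  have h1 := le_max_left w (bl : Int)
  have h2 := le_max_right w (bl : Int)
  have hblL : bl ≤ L := by omega
  have hd : (w - (bl : Int)).toNat = L - bl := by
    rcases max_choice w (bl : Int) with h | h <;> omega
  rw [hd]
  unfold pvRevBits
  have hsplit : List.range L = List.range' 0 bl ++ List.range' bl (L - bl) := by
    rw [List.range_eq_range', show L = bl + (L - bl) by omega, ← List.range'_append]
    simp
  have hrep : (List.range' bl (L - bl)).map p = List.replicate (L - bl) (0 : Int) := by
    have hall : ∀ b ∈ (List.range' bl (L - bl)).map p, b = (0 : Int) := by
      intro b hb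
      simp only [List.mem_map] at hb
      obtain ⟨t, ht, rfl⟩ := hb
      exact hz t (List.mem_range'_1.mp ht).1
    simpa using List.eq_replicate_of_mem hall
  rw [hsplit, List.map_append, hrep, List.reverse_append, List.reverse_replicate]
  congr 1
  rw [List.range_eq_range']

-- the last_one fold: counter component
theorem pvLastStep_counter (xs : List Int) (acc : Option Int) (c : Int) :
    (xs.foldl pvLastStep (acc, c)).2 = c + xs.length := by
  induction xs generalizing acc c with
  | nil => simp
  | cons x xs ih => simp [pvLastStep, ih]; omega

-- the last_one fold finds L-1-j for the least j with p j = 1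
theorem pvLastFold_found (L : Nat) (p : Nat → Int) (acc : Option Int) (j : Nat)
    (hj : j < L) (h1 : p j = 1) (hmin : ∀ t, t < j → p t ≠ 1) :
    ((pvRevBits p L).foldl pvLastStep (acc, 0)).1 = some ((L : Int) - 1 - (j : Int)) := by
  induction L generalizing p acc j with
  | zero => omega
  | succ L ih =>
    rw [pvRevBits_succ, List.foldl_append]
    match j, hj with
    | 0, _ =>
      simp only [List.foldl_cons, List.foldl_nil, pvLastStep, h1]
      rw [pvLastStep_counter, pvRevBits_length]
      simp
    | (j' + 1), hj =>
      have hp0 : p 0 ≠ 1 := hmin 0 (Nat.succ_pos j')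
      simp only [List.foldl_cons, List.foldl_nil, pvLastStep, if_neg hp0]
      have := ih (fun t => p (t + 1)) acc j' (by omega) h1
        (fun t ht => hmin (t + 1) (by omega))
      rw [this]
      congr 1
      push_cast
      ring

-- downward scan: no zero at or below i
theorem pvFzd_none (p : Nat → Int) (L : Nat) (i : Int) (hiL : i < (L : Int))
    (h : ∀ t : Nat, (t : Int) ≤ i → p (L - 1 - t) ≠ 0) :
    pvFirstZeroDown (pvRevBits p L) i = none := by
  have key : ∀ (n : Nat) (i : Int), (i + 1).toNat = n → i < (L : Int) →
      (∀ t : Nat, (t : Int) ≤ i → p (L - 1 - t) ≠ 0) → pvFirstZeroDown (pvRevBits p L) i = none := by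
    intro n
    induction n using Nat.strong_induction_on with
    | _ n ih =>
      intro i hn hiL hh
      rw [pvFirstZeroDown]
      by_cases h0 : 0 ≤ i
      · rw [dif_pos h0, pvRevBits_getD p L i 1 h0 hiL,
          if_neg (hh i.toNat (by omega))]
        exact ih i.toNat (by omega) (i - 1) (by omega) (by omega) (fun t ht => hh t (by omega))
      · rw [dif_neg h0]
  exact key _ i rfl hiL h

-- downward scan: first zero (greatest index ≤ i with a zero) is t0
theorem pvFzd_found (p : Nat → Int) (L : Nat) (i : Int) (t0 : Nat)
    (ht0 : (t0 : Int) ≤ i) (hiL : i < (L : Int)) (hz : p (L - 1 - t0) = 0)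
    (hmid : ∀ t : Nat, t0 < t → (t : Int) ≤ i → p (L - 1 - t) ≠ 0) :
    pvFirstZeroDown (pvRevBits p L) i = some (t0 : Int) := by
  have key : ∀ (n : Nat) (i : Int), (i + 1).toNat = n → (t0 : Int) ≤ i → i < (L : Int) →
      (∀ t : Nat, t0 < t → (t : Int) ≤ i → p (L - 1 - t) ≠ 0) →
      pvFirstZeroDown (pvRevBits p L) i = some (t0 : Int) := by
    intro n
    induction n using Nat.strong_induction_on with
    | _ n ih =>
      intro i hn ht0i hiL hmid'
      have h0 : 0 ≤ i := by omega
      rw [pvFirstZeroDown, dif_pos h0, pvRevBits_getD p L i 1 h0 hiL]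
      by_cases he : i.toNat = t0
      · rw [if_pos (by rw [he]; exact hz)]
        congr 1
        omega
      · rw [if_neg (hmid' i.toNat (by omega) (by omega))]
        exact ih i.toNat (by omega) (i - 1) (by omega) (by omega) (by omega)
          (fun t ht1 ht2 => hmid' t ht1 (by omega))
  exact key _ i rfl ht0 hiL hmid

-- the final refold computes the weighted bit sum
theorem pvValFold (L : Nat) (p : Nat → Int) (r : Int) :
    (pvRevBits p L).foldl pvValStep r =
      r * 2 ^ L + ∑ t ∈ Finset.range L, (if p t ≠ 0 then (1 : Int) else 0) * 2 ^ t := by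
  induction L generalizing p r with
  | zero => simp [pvRevBits_zero]
  | succ L ih =>
    rw [pvRevBits_succ, List.foldl_append, ih]
    simp only [List.foldl_cons, List.foldl_nil, pvValStep]
    rw [Finset.sum_range_succ']
    have h2 : ∑ t ∈ Finset.range L, (if p (t + 1) ≠ 0 then (1 : Int) else 0) * 2 ^ (t + 1)
        = 2 * ∑ t ∈ Finset.range L, (if p (t + 1) ≠ 0 then (1 : Int) else 0) * 2 ^ t := by
      rw [Finset.mul_sum]
      exact Finset.sum_congr rfl fun t _ => by ring
    rw [h2]
    split_ifs with h0 <;> ring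

theorem pvSumBits (L M : Nat) :
    (∑ t ∈ Finset.range L, (if M.testBit t then (1 : Int) else 0) * 2 ^ t) = ((M % 2 ^ L : Nat) : Int) := by
  induction L with
  | zero => simp
  | succ L ih =>
    rw [Finset.sum_range_succ, ih]
    have hmm : M % 2 ^ (L + 1) = M % 2 ^ L + 2 ^ L * (M / 2 ^ L % 2) := by
      rw [pow_succ]; exact Nat.mod_mul
    have hb := Nat.testBit_eq_decide_div_mod_eq (x := M) (i := L)
    by_cases ht : M.testBit L
    · have h1 : M / 2 ^ L % 2 = 1 := by rw [hb] at ht; simpa using ht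
      rw [if_pos ht]; push_cast [hmm, h1]; ring
    · have h1 : M / 2 ^ L % 2 ≠ 1 := by rw [hb] at ht; simpa using ht
      have h0 : M / 2 ^ L % 2 = 0 := by omega
      rw [if_neg ht]; push_cast [hmm, h0]; ring

-- bit test seen by B's scan
theorem pvBandBit (M : Nat) (s : Nat) :
    PySem.Int.band ((M : Int) >>> s) 1 = if M.testBit s then 1 else 0 := by
  rw [← Int.natCast_shiftRight, show (1 : Int) = ((1 : Nat) : Int) from rfl,
    PySem.Int.band_natCast]
  have hdm : (M >>> s) &&& 1 = M / 2 ^ s % 2 := by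
    rw [Nat.and_one_is_mod, Nat.shiftRight_eq_div_pow]
  rw [hdm, Nat.testBit_eq_decide_div_mod_eq]
  by_cases h : M / 2 ^ s % 2 = 1
  · simp [h]
  · have h0 : M / 2 ^ s % 2 = 0 := by omega
    simp [h0]

-- B's scan skips positions whose bit is 0 while j is unset
theorem pvBScan_skip_none (m : Int) (M : Nat) (hm : m = (M : Int)) (s c : Nat) (rest : List Int)
    (h : ∀ t, s ≤ t → t < s + c → ¬ M.testBit t) :
    pvBScan m none ((List.range' s c).map (fun t : Nat => (t : Int)) ++ rest) = pvBScan m none rest := by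
  induction c generalizing s with
  | zero => simp
  | succ c ih =>
    rw [List.range'_succ, List.map_cons, List.cons_append, pvBScan]
    rw [hm, show ((s : Int)).toNat = s by omega, pvBandBit,
      if_neg (h s le_rfl (by omega))]
    simp only [ne_eq, not_true_eq_false, if_false]
    rw [← hm]
    exact ih (s + 1) (fun t ht1 ht2 => h t (by omega) (by omega))

-- B's scan skips positions whose bit is 1 once j is set
theorem pvBScan_skip_some (m : Int) (M : Nat) (hm : m = (M : Int)) (j : Int) (s c : Nat) (rest : List Int)
    (h : ∀ t, s ≤ t → t < s + c → M.testBit t) :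
    pvBScan m (some j) ((List.range' s c).map (fun t : Nat => (t : Int)) ++ rest) = pvBScan m (some j) rest := by
  induction c generalizing s with
  | zero => simp
  | succ c ih =>
    rw [List.range'_succ, List.map_cons, List.cons_append, pvBScan]
    rw [hm, show ((s : Int)).toNat = s by omega, pvBandBit,
      if_pos (h s le_rfl (by omega))]
    simp only [ne_eq, one_ne_zero, not_false_eq_true, if_true]
    rw [← hm]
    exact ih (s + 1) (fun t ht1 ht2 => h t (by omega) (by omega))

theorem pvClearA_pos (f : Nat) (m m' : Int) (hm : 0 < m) (h : pvClearA f m = some m') : 0 < m' := by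
  induction f generalizing m with
  | zero => simp [pvClearA] at h; omega
  | succ f ih =>
    simp only [pvClearA] at h
    split at h
    · exact absurd h (by simp)
    · rename_i hne
      exact ih _ (lt_of_le_of_ne (PySem.Int.band_nonneg_of_nonneg_left _ (by omega)) (Ne.symm hne)) h

-- the core: after the clearing loop both tails agree on every positive m
theorem pvSumSwap (L M j p0 : Nat) (hjL : j < L) (hp0L : p0 < L) (hne : j ≠ p0)
    (hfj : M.testBit j) (hfp0 : ¬ M.testBit p0) (hML : M < 2 ^ L) :
    (∑ t ∈ Finset.range L,
        (if (Function.update (Function.update (fun t => if M.testBit t then (1 : Int) else 0) j 0) p0 1) t ≠ 0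
          then (1 : Int) else 0) * 2 ^ t) = (M : Int) - 2 ^ j + 2 ^ p0 := by
  set base : Nat → Int := fun t => (if (fun t => if M.testBit t then (1 : Int) else 0) t ≠ 0 then (1 : Int) else 0) * 2 ^ t with hbase
  have hfun1 : (fun t => (if (Function.update (Function.update (fun t => if M.testBit t then (1 : Int) else 0) j 0) p0 1) t ≠ 0 then (1 : Int) else 0) * 2 ^ t)
      = Function.update (fun t => (if (Function.update (fun t => if M.testBit t then (1 : Int) else 0) j 0) t ≠ 0 then (1 : Int) else 0) * 2 ^ t) p0 (2 ^ p0) := by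
    funext t
    by_cases h : t = p0 <;> simp [Function.update_apply, h]
  have hfun2 : (fun t => (if (Function.update (fun t => if M.testBit t then (1 : Int) else 0) j 0) t ≠ 0 then (1 : Int) else 0) * 2 ^ t)
      = Function.update base j 0 := by
    funext t
    by_cases h : t = j <;> simp [hbase, Function.update_apply, h]
  have hjmem : j ∈ Finset.range L \ {p0} := by
    rw [Finset.mem_sdiff]
    exact ⟨Finset.mem_range.mpr hjL, by simp [hne]⟩
  rw [hfun1, Finset.sum_update_of_mem (Finset.mem_range.mpr hp0L), hfun2,
    Finset.sum_update_of_mem hjmem]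
  have hsum : ∑ t ∈ Finset.range L, base t = (M : Int) := by
    have := pvSumBits L M
    rw [Nat.mod_eq_of_lt hML] at this
    rw [← this, hbase]
    exact Finset.sum_congr rfl fun t _ => by by_cases h : M.testBit t <;> simp [h]
  have h1 : ∑ t ∈ Finset.range L, base t = base p0 + ∑ t ∈ Finset.range L \ {p0}, base t :=
    Finset.sum_eq_add_sum_diff_singleton p0 base (fun hni => absurd (Finset.mem_range.mpr hp0L) hni)
  have h2 : ∑ t ∈ Finset.range L \ {p0}, base t = base j + ∑ t ∈ (Finset.range L \ {p0}) \ {j}, base t :=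
    Finset.sum_eq_add_sum_diff_singleton j base (fun hni => absurd hjmem hni)
  have hbp0 : base p0 = 0 := by simp [hbase, hfp0]
  have hbj : base j = 2 ^ j := by simp [hbase, hfj]
  have h3 : ∑ t ∈ (Finset.range L \ {p0}) \ {j}, base t = (M : Int) - 2 ^ j := by
    rw [← hsum, h1, h2, hbp0, hbj]; ring
  rw [h3]
  ring

theorem pvCore (m width : Int) (hm : 0 < m) : pvSwapA m width = pvScanB m width := by
  obtain ⟨M, rfl⟩ : ∃ M : Nat, m = (M : Int) := ⟨m.toNat, by omega⟩
  have hM : 0 < M := by omega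
  set f : Nat → Int := fun t => if M.testBit t then (1 : Int) else 0 with hf
  set bl := PySem.Int.bitLength (M : Int) with hbl
  have hMlt : M < 2 ^ bl := by simpa using PySem.Int.lt_two_pow_bitLength (M : Int)
  have hbl1 : 1 ≤ bl := by
    by_contra h
    have : bl = 0 := by omega
    rw [this] at hMlt
    omega
  set L := (max width (bl : Int)).toNat with hL
  have hmax1 := le_max_left width (bl : Int)
  have hmax2 := le_max_right width (bl : Int)
  have hblL : bl ≤ L := by omega
  have hLcast : ((L : Int)) = max width (bl : Int) := by omega
  have hzero : ∀ t, bl ≤ t → f t = 0 := by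
    intro t ht
    have : M.testBit t = false :=
      Nat.testBit_lt_two_pow (lt_of_lt_of_le hMlt (Nat.pow_le_pow_right (by norm_num) ht))
    simp [hf, this]
  have hbits : pvGetBits (M : Int) = pvRevBits f bl := by
    simp only [pvGetBits, Int.toNat_natCast]
    rw [pvGetBitsNat_eq]
  have hlen : ((pvGetBits (M : Int)).length : Int) = (bl : Int) := by
    rw [hbits, pvRevBits_length]
  have hpad : List.replicate (width - ((pvGetBits (M : Int)).length : Int)).toNat (0 : Int) ++ pvGetBits (M : Int)
      = pvRevBits f L := by
    rw [hlen, hbits, pvPad_eq width f bl hzero]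
  -- j: lowest set bit of M
  have hex : ∃ t, M.testBit t := Nat.exists_testBit_of_ne_zero (by omega)
  set j := Nat.find hex with hj
  have hjbit : M.testBit j := Nat.find_spec hex
  have hjmin : ∀ t, t < j → ¬ M.testBit t := fun t ht => Nat.find_min hex ht
  have hjbl : j < bl := by
    by_contra h
    exact absurd hjbit (by
      simpa using Nat.testBit_lt_two_pow
        (lt_of_lt_of_le hMlt (Nat.pow_le_pow_right (by norm_num) (by omega))))
  have hjL : j < L := lt_of_lt_of_le hjbl hblL
  have hfj : f j = 1 := by simp [hf, hjbit]
  have hfmin : ∀ t, t < j → f t ≠ 1 := fun t ht => by simp [hf, hjmin t ht]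
  -- unfold both sides
  simp only [pvSwapA, pvScanB, hpad]
  rw [pvLastFold_found L f none j hjL hfj hfmin]
  rw [← hLcast]
  dsimp only
  -- B's range, split at j
  have hrange : PySem.List.pyRange 0 (L : Int) = (List.range' 0 L).map (fun t : Nat => (t : Int)) := by
    rw [PySem.List.pyRange_one, List.range_eq_range']
    simp
  have hsplit1 : List.range' 0 L = List.range' 0 j ++ List.range' j (L - j) := by
    have h := List.range'_append (s := 0) (m := j) (n := L - j) (step := 1)
    simp only [Nat.zero_add, Nat.one_mul] at h
    rw [h, show j + (L - j) = L by omega]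
  have hcons1 : List.range' j (L - j) = j :: List.range' (j + 1) (L - j - 1) := by
    rw [show L - j = (L - j - 1) + 1 by omega, List.range'_succ,
      show L - j - 1 + 1 - 1 = L - j - 1 by omega]
  rw [hrange, hsplit1, List.map_append,
    pvBScan_skip_none (M : Int) M rfl 0 j _ (fun t _ ht2 => hjmin t (by omega)),
    hcons1, List.map_cons, pvBScan, Int.toNat_natCast, pvBandBit, if_pos hjbit]
  simp only [ne_eq, one_ne_zero, not_false_eq_true, if_true]
  by_cases hzex : ∃ p, j < p ∧ p < L ∧ ¬ M.testBit p
  · -- a zero exists above j and below L: both return M - 2^j + 2^p0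
    set p0 := Nat.find hzex with hp0
    obtain ⟨hjp0, hp0L, hp0bit⟩ := Nat.find_spec hzex
    rw [← hp0] at hjp0 hp0L hp0bit
    have hmid : ∀ r, j < r → r < p0 → M.testBit r := by
      intro r h1 h2
      by_contra hb
      exact Nat.find_min hzex h2 ⟨h1, lt_trans h2 hp0L, hb⟩
    have hz0 : f (L - 1 - (L - 1 - p0)) = 0 := by
      rw [show L - 1 - (L - 1 - p0) = p0 by omega]
      simp [hf, hp0bit]
    have hmid' : ∀ t : Nat, L - 1 - p0 < t → (t : Int) ≤ (L : Int) - 1 - (j : Int) - 1 → f (L - 1 - t) ≠ 0 := by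
      intro t h1 h2
      have hr1 : j < L - 1 - t := by omega
      have hr2 : L - 1 - t < p0 := by omega
      simp [hf, hmid _ hr1 hr2]
    rw [pvFzd_found f L ((L : Int) - 1 - (j : Int) - 1) (L - 1 - p0) (by push_cast; omega)
      (by push_cast; omega) hz0 hmid']
    dsimp only
    rw [pvRevBits_getD f L _ 0 (by push_cast; omega) (by push_cast; omega),
      pvRevBits_getD f L _ 0 (by push_cast; omega) (by push_cast; omega),
      show ((L : Int) - 1 - (j : Int)).toNat = L - 1 - j by omega,
      show (((L - 1 - p0 : Nat) : Int)).toNat = L - 1 - p0 by omega,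
      show L - 1 - (L - 1 - p0) = p0 by omega,
      show L - 1 - (L - 1 - j) = j by omega]
    have hfp0v : f p0 = 0 := by
      simp only [hf]
      rw [if_neg hp0bit]
    rw [hfp0v, hfj, pvRevBits_set f L j 0 hjL, pvRevBits_set _ L p0 1 hp0L, pvValFold]
    have hML : M < 2 ^ L := lt_of_lt_of_le hMlt (Nat.pow_le_pow_right (by norm_num) hblL)
    simp only [hf]
    rw [pvSumSwap L M j p0 hjL hp0L (by omega) hjbit hp0bit hML]
    -- B side: skip the 1-run (j, p0), stop at p0
    have hsplit2 : List.range' (j + 1) (L - j - 1)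
        = List.range' (j + 1) (p0 - j - 1) ++ List.range' p0 (L - p0) := by
      have h := List.range'_append (s := j + 1) (m := p0 - j - 1) (n := L - p0) (step := 1)
      simp only [Nat.one_mul] at h
      rw [show j + 1 + (p0 - j - 1) = p0 by omega] at h
      rw [show L - j - 1 = p0 - j - 1 + (L - p0) by omega]
      exact h.symm
    have hcons2 : List.range' p0 (L - p0) = p0 :: List.range' (p0 + 1) (L - p0 - 1) := by
      rw [show L - p0 = (L - p0 - 1) + 1 by omega, List.range'_succ,
        show L - p0 - 1 + 1 - 1 = L - p0 - 1 by omega]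
    rw [hsplit2, List.map_append,
      pvBScan_skip_some (M : Int) M rfl (j : Int) (j + 1) (p0 - j - 1) _
        (fun t ht1 ht2 => hmid t (by omega) (by omega)),
      hcons2, List.map_cons, pvBScan, Int.toNat_natCast, pvBandBit, if_neg hp0bit]
    simp only [ne_eq, not_true_eq_false, if_false, Int.toNat_natCast]
    congr 1
    push_cast [Nat.shiftLeft_eq]
    ring
  · -- no zero above j within the width: both return none
    push_neg at hzex
    have hallone : ∀ t : Nat, (t : Int) ≤ (L : Int) - 1 - (j : Int) - 1 → f (L - 1 - t) ≠ 0 := by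
      intro t ht
      have h1 : j < L - 1 - t := by omega
      have h2 : L - 1 - t < L := by omega
      simp [hf, hzex _ h1 h2]
    rw [pvFzd_none f L ((L : Int) - 1 - (j : Int) - 1) (by push_cast; omega) hallone]
    rw [← List.append_nil ((List.range' (j + 1) (L - j - 1)).map (fun t : Nat => (t : Int))),
      pvBScan_skip_some (M : Int) M rfl (j : Int) (j + 1) (L - j - 1) []
        (fun t ht1 ht2 => hzex t (by omega) (by omega))]
    rfl

-- ===== VERDICT (by name: the statement is the Claim_ definition above) =====
theorem successor_with_fewer_bits_spec : Claim_equal_successor_with_fewer_bits := by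
  intro n k width _ hpre
  unfold Spec_successor_with_fewer_bits successor_with_fewer_bits successor_with_fewer_bits_alt
  by_cases hn : n = 0
  · simp [hn]
  · have hn' : 0 < n := lt_of_le_of_ne hpre (Ne.symm hn)
    simp only [hn, if_false]
    cases hc : pvClearA k.toNat n with
    | none => rfl
    | some m => exact pvCore m width (pvClearA_pos _ _ _ hn' hc)
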